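-- pv_equiv track=rewrite | github.com/embed111/workflow_code | src/workflow_app/server/services/defect_service_task_commands.py | _assignment_metrics
-- ===== SOURCE A (Python) =====
-- from typing import Any
--
-- def _assignment_active_rows(rows: list[dict[str, Any]]) -> list[dict[str, Any]]:
--     return [
--         dict(row)
--         for row in list(rows or [])
--         if str(row.get("record_state") or "active").strip().lower() != "deleted"
--     ]
--
-- def _assignment_metrics(rows: list[dict[str, Any]]) -> dict[str, int]:
--     active_rows = _assignment_active_rows(rows)
--     running_nodes = sum(1 for row in active_rows if str(row.get("status") or "").strip().lower() == "running")
--     executed_count = sum(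
--         1
--         for row in active_rows
--         if str(row.get("status") or "").strip().lower() in {"running", "succeeded", "failed"}
--     )
--     return {
--         "active_nodes": len(active_rows),
--         "running_nodes": running_nodes,
--         "executed_count": executed_count,
--     }
-- ===== SOURCE B (Python) =====
-- def _assignment_metrics(rows):
--     active_nodes = running_nodes = executed_count = 0
--     for row in (rows or []):
--         if str(row.get("record_state") or "active").strip().lower() == "deleted":
--             continue
--         active_nodes += 1
--         st = str(row.get("status") or "").strip().lower()
--         if st == "running":
--             running_nodes += 1
--             executed_count += 1
--         elif st in ("succeeded", "failed"):
--             executed_count += 1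
--     return {
--         "active_nodes": active_nodes,
--         "running_nodes": running_nodes,
--         "executed_count": executed_count,
--     }
-- ===== Notes on version B (the rewrite author's own statement) =====
-- stated objective: alternative
-- what changed: Replaces the filtered list of dict copies plus two separate counting passes with a single loop over the rows maintaining three counters.
import Mathlib
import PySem

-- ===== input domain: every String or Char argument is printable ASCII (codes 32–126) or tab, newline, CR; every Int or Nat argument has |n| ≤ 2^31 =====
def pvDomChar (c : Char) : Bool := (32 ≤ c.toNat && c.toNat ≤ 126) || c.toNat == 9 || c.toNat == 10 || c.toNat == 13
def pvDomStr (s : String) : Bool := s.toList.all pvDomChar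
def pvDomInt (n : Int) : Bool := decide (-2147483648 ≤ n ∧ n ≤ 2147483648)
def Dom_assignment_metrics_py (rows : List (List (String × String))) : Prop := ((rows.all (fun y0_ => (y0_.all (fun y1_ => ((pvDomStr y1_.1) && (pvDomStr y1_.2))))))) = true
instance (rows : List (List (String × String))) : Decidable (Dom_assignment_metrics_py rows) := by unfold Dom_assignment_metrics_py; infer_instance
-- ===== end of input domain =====

-- B replaces A's filtered list of row copies plus two extra counting passes with one
-- loop over the rows maintaining three counters (alternative decomposition, same cost class).

-- ===== PORT A =====

-- str(row.get(k) or dflt): missing key or empty (falsy) value falls back to dflt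
def pvGetOr (row : List (String × String)) (k dflt : String) : String :=
  match row.find? (fun p => p.1 == k) with
  | some (_, v) => if v = "" then dflt else v
  | none => dflt

-- .strip().lower()
def pvNorm (s : String) : String := PySem.Str.lower (PySem.Str.strip s)

def assignment_active_rows_py (rows : List (List (String × String))) : List (List (String × String)) :=
  rows.filter (fun row => pvNorm (pvGetOr row "record_state" "active") ≠ "deleted")

def assignment_metrics_py (rows : List (List (String × String))) : List (String × Int) :=
  let active_rows := assignment_active_rows_py rows
  let running_nodes : Int :=
    (active_rows.filter (fun row => pvNorm (pvGetOr row "status" "") = "running")).length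
  let executed_count : Int :=
    (active_rows.filter (fun row =>
      pvNorm (pvGetOr row "status" "") = "running" ∨
      pvNorm (pvGetOr row "status" "") = "succeeded" ∨
      pvNorm (pvGetOr row "status" "") = "failed")).length
  [("active_nodes", (active_rows.length : Int)),
   ("running_nodes", running_nodes),
   ("executed_count", executed_count)]

-- ===== PORT B =====

def pvStepB (acc : Int × Int × Int) (row : List (String × String)) : Int × Int × Int :=
  if pvNorm (pvGetOr row "record_state" "active") = "deleted" then acc
  else
    let st := pvNorm (pvGetOr row "status" "")
    if st = "running" then (acc.1 + 1, acc.2.1 + 1, acc.2.2 + 1)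
    else if st = "succeeded" ∨ st = "failed" then (acc.1 + 1, acc.2.1, acc.2.2 + 1)
    else (acc.1 + 1, acc.2.1, acc.2.2)

def assignment_metrics_py_alt (rows : List (List (String × String))) : List (String × Int) :=
  let res := rows.foldl pvStepB (0, 0, 0)
  [("active_nodes", res.1), ("running_nodes", res.2.1), ("executed_count", res.2.2)]

-- ===== PRECONDITION & SPEC =====
def Spec_assignment_metrics_py (rows : List (List (String × String))) (out : List (String × Int)) : Prop := out = assignment_metrics_py_alt rows
instance (rows : List (List (String × String))) (out : List (String × Int)) : Decidable (Spec_assignment_metrics_py rows out) := by unfold Spec_assignment_metrics_py; infer_instance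

-- ===== CLAIM (what is proved, stated in full; the proofs are below) =====
def Claim_equal_assignment_metrics_py : Prop := ∀ (rows : List (List (String × String))), Dom_assignment_metrics_py rows → Spec_assignment_metrics_py rows (assignment_metrics_py rows)

-- ===== LEMMAS AND PROOFS =====

theorem pvFold_inv (rows : List (List (String × String))) (a r e : Int) :
    rows.foldl pvStepB (a, r, e) =
      (a + ((assignment_active_rows_py rows).length : Int),
       r + ((assignment_active_rows_py rows).filter
              (fun row => pvNorm (pvGetOr row "status" "") = "running")).length,
       e + ((assignment_active_rows_py rows).filter (fun row =>
              pvNorm (pvGetOr row "status" "") = "running" ∨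
              pvNorm (pvGetOr row "status" "") = "succeeded" ∨
              pvNorm (pvGetOr row "status" "") = "failed")).length) := by
  induction rows generalizing a r e with
  | nil => simp [assignment_active_rows_py]
  | cons row rest ih =>
    simp only [List.foldl_cons, assignment_active_rows_py, List.filter_cons, pvStepB]
    by_cases hdel : pvNorm (pvGetOr row "record_state" "active") = "deleted"
    · simp [hdel, ih, assignment_active_rows_py]
    · by_cases hr : pvNorm (pvGetOr row "status" "") = "running"
      · simp [hdel, hr, ih, assignment_active_rows_py]; omega
      · by_cases hsf : pvNorm (pvGetOr row "status" "") = "succeeded" ∨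
                       pvNorm (pvGetOr row "status" "") = "failed"
        · simp [hdel, hr, hsf, ih, assignment_active_rows_py]; omega
        · simp [hdel, hr, hsf, ih, assignment_active_rows_py]; omega

-- ===== VERDICT (by name: the statement is the Claim_ definition above) =====
theorem assignment_metrics_py_spec : Claim_equal_assignment_metrics_py := by
  intro rows _
  unfold Spec_assignment_metrics_py assignment_metrics_py assignment_metrics_py_alt
  simp [pvFold_inv rows 0 0 0]
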